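-- pv_equiv track=rewrite | github.com/aliahmedd24/Agentic-System-for-Scientific-Code | agents/parsers/r_parser.py | _get_roxygen_docstring
-- ===== SOURCE A (Python) =====
-- from typing import Dict, List
--
-- def _get_roxygen_docstring(lines: List[str], func_line: int) -> str:
--     """Extract roxygen2 documentation."""
--     docstring_lines = []
--     i = func_line - 1
--
--     while i >= 0:
--         line = lines[i].strip()
--         if line.startswith("#'"):
--             docstring_lines.append(line[2:].strip())
--         elif line.startswith("#"):
--             pass  # Skip regular comments
--         elif line:
--             break
--         i -= 1
--
--     return "\n".join(reversed(docstring_lines))[:500]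
-- ===== SOURCE B (Python) =====
-- from typing import Dict, List
--
-- def _get_roxygen_docstring(lines: List[str], func_line: int) -> str:
--     """Extract roxygen2 documentation."""
--     # Backward scan only to locate the start of the comment block.
--     start = 0
--     for i in range(func_line - 1, -1, -1):
--         s = lines[i].strip()
--         if s and not s.startswith("#"):
--             start = i + 1
--             break
--     # Forward comprehension collects the roxygen lines already in order.
--     doc = [lines[i].strip()[2:].strip()
--            for i in range(start, func_line)
--            if lines[i].strip().startswith("#'")]
--     return "\n".join(doc)[:500]
-- ===== Notes on version B (the rewrite author's own statement) =====
-- stated objective: alternative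
-- what changed: A collects roxygen lines in a single backward scan and reverses at the end; B first does a backward scan only to locate the start of the comment block, then a forward comprehension that collects the lines already in order, so no reversed() is needed.
import Mathlib
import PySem

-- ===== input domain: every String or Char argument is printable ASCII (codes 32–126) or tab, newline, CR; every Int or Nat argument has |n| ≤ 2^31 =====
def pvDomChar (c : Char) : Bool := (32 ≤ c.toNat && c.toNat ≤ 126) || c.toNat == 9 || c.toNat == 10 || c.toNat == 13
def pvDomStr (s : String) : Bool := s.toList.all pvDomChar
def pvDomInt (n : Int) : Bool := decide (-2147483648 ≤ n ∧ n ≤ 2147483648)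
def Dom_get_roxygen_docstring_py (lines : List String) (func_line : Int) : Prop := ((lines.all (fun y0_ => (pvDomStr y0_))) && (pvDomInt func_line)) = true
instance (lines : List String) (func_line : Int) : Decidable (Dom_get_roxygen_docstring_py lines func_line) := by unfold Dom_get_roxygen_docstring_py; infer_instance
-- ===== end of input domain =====

-- B replaces A's single backward collect-then-reverse loop by a backward boundary scan that only
-- finds the block start plus a forward comprehension collecting the lines in order (objective: alternative).

-- ===== PORT A =====
-- the while loop: argument `n` is i+1 (so n = 0 is i < 0), acc is docstring_lines
def pvAloop (lines : List String) : Nat → List String → List String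
  | 0, acc => acc
  | Nat.succ k, acc =>
    match PySem.List.pyGet? lines (k : Int) with
    | none => acc  -- Python raises IndexError here; excluded by Pre_
    | some l =>
      let line := PySem.Str.strip l
      if PySem.Str.startswith line "#'" then
        pvAloop lines k (acc ++ [PySem.Str.strip (PySem.Str.slice line (some 2) none)])
      else if PySem.Str.startswith line "#" then
        pvAloop lines k acc
      else if line ≠ "" then acc
      else pvAloop lines k acc

def get_roxygen_docstring_py (lines : List String) (func_line : Int) : String :=
  let docstring_lines := pvAloop lines func_line.toNat []
  PySem.Str.slice (PySem.Str.join "\n" docstring_lines.reverse) none (some 500)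

-- ===== PORT B =====
-- backward scan for the block start (argument n is i+1)
def pvBstart (lines : List String) : Nat → Nat
  | 0 => 0
  | Nat.succ k =>
    match PySem.List.pyGet? lines (k : Int) with
    | none => 0  -- Python raises IndexError here; excluded by Pre_
    | some l =>
      let s := PySem.Str.strip l
      if !(s == "") && !(PySem.Str.startswith s "#") then k + 1
      else pvBstart lines k

-- the forward comprehension over range(a, b)
def pvBcollect (lines : List String) (a b : Int) : List String :=
  (PySem.List.pyRange a b 1).filterMap (fun i =>
    match PySem.List.pyGet? lines i with
    | none => none  -- IndexError in Python; unreachable under Pre_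
    | some l =>
      let s := PySem.Str.strip l
      if PySem.Str.startswith s "#'" then
        some (PySem.Str.strip (PySem.Str.slice s (some 2) none))
      else none)

def get_roxygen_docstring_py_alt (lines : List String) (func_line : Int) : String :=
  let start := pvBstart lines func_line.toNat
  PySem.Str.slice (PySem.Str.join "\n" (pvBcollect lines (start : Int) func_line)) none (some 500)

-- ===== PRECONDITION & SPEC =====
-- Pre_ excludes exactly the inputs where A raises IndexError: func_line - 1 ≥ len(lines)
def Pre_get_roxygen_docstring_py (lines : List String) (func_line : Int) : Prop :=
  func_line ≤ (lines.length : Int)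
instance (lines : List String) (func_line : Int) : Decidable (Pre_get_roxygen_docstring_py lines func_line) := by unfold Pre_get_roxygen_docstring_py; infer_instance

def pvWitness_get_roxygen_docstring_py : List String × Int :=
  (["#' Adds one", "#' @param x a number", "f <- function(x) {"], 2)

def Spec_get_roxygen_docstring_py (lines : List String) (func_line : Int) (out : String) : Prop := out = get_roxygen_docstring_py_alt lines func_line
instance (lines : List String) (func_line : Int) (out : String) : Decidable (Spec_get_roxygen_docstring_py lines func_line out) := by unfold Spec_get_roxygen_docstring_py; infer_instance

-- ===== CLAIM (what is proved, stated in full; the proofs are below) =====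
def Claim_equal_get_roxygen_docstring_py : Prop := ∀ (lines : List String) (func_line : Int), Dom_get_roxygen_docstring_py lines func_line → Pre_get_roxygen_docstring_py lines func_line → Spec_get_roxygen_docstring_py lines func_line (get_roxygen_docstring_py lines func_line)

-- ===== LEMMAS AND PROOFS =====

-- a string starting with "#'" starts with "#"
theorem pv_starts_hash {s : String} (h : PySem.Str.startswith s "#'" = true) :
    PySem.Str.startswith s "#" = true := by
  rw [PySem.Str.startswith_eq] at h ⊢
  rw [PySem.Chars.startswith_iff] at h ⊢
  exact List.IsPrefix.trans (by simp) h

theorem pvAloop_acc (lines : List String) :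
    ∀ (n : Nat) (acc : List String), pvAloop lines n acc = acc ++ pvAloop lines n [] := by
  intro n
  induction n with
  | zero => intro acc; simp [pvAloop]
  | succ k ih =>
    intro acc
    simp only [pvAloop]
    cases hget : PySem.List.pyGet? lines (k : Int) with
    | none => simp
    | some l =>
      simp only
      split_ifs
      · rw [ih (acc ++ _), ih ([] ++ _)]; simp
      · rw [ih acc]
      · simp
      · rw [ih acc]

theorem pvBstart_le (lines : List String) : ∀ n : Nat, pvBstart lines n ≤ n := by
  intro n
  induction n with
  | zero => simp [pvBstart]
  | succ k ih =>
    simp only [pvBstart]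
    cases hget : PySem.List.pyGet? lines (k : Int) with
    | none => simp
    | some l =>
      simp only
      split_ifs <;> omega

theorem pv_main (lines : List String) :
    ∀ n : Nat, n ≤ lines.length →
      (pvAloop lines n []).reverse = pvBcollect lines (pvBstart lines n) (n : Int) := by
  intro n
  induction n with
  | zero =>
    intro _
    simp [pvAloop, pvBstart, pvBcollect, PySem.List.pyRange_one_eq_nil]
  | succ k ih =>
    intro hlen
    have hk : k < lines.length := by omega
    have hget : PySem.List.pyGet? lines (k : Int) = some lines[k] := by
      rw [PySem.List.pyGet?_natCast]; exact List.getElem?_eq_getElem hk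
    have hsplit : PySem.List.pyRange (pvBstart lines k) ((k : Int) + 1) 1
        = PySem.List.pyRange (pvBstart lines k) (k : Int) 1 ++ [(k : Int)] :=
      PySem.List.pyRange_one_succ_right (by exact_mod_cast pvBstart_le lines k)
    have hcast : ((k + 1 : Nat) : Int) = (k : Int) + 1 := by push_cast; ring
    simp only [pvAloop, pvBstart, hget]
    by_cases h1 : PySem.Str.startswith (PySem.Str.strip lines[k]) "#'" = true
    · -- roxygen line: collected on both sides
      have h2 : PySem.Str.startswith (PySem.Str.strip lines[k]) "#" = true := pv_starts_hash h1
      rw [if_pos h1]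
      have hb : (!(PySem.Str.strip lines[k] == "") && !(PySem.Str.startswith (PySem.Str.strip lines[k]) "#")) = false := by
        simp
        intro _
        simpa using h2
      rw [hb]
      simp only [Bool.false_eq_true, if_false]
      rw [pvAloop_acc lines k, hcast, pvBcollect, hsplit]
      simp only [List.filterMap_append, List.reverse_append]
      rw [← pvBcollect, ih (by omega)]
      have c1 : PySem.Chars.startswith (PySem.Chars.strip lines[k].toList) ['#', '\''] = true := by
        simpa using h1
      simp [pvBcollect, hget, c1]
    · have c1 : PySem.Chars.startswith (PySem.Chars.strip lines[k].toList) ['#', '\''] = false := by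
        simpa using h1
      by_cases h2 : PySem.Str.startswith (PySem.Str.strip lines[k]) "#" = true
      · -- plain comment: skipped on both sides
        rw [if_neg h1, if_pos h2]
        have hb : (!(PySem.Str.strip lines[k] == "") && !(PySem.Str.startswith (PySem.Str.strip lines[k]) "#")) = false := by
          simp
          intro _
          simpa using h2
        rw [hb]
        simp only [Bool.false_eq_true, if_false]
        rw [hcast, pvBcollect, hsplit]
        simp only [List.filterMap_append]
        rw [← pvBcollect, ih (by omega)]
        simp [pvBcollect, hget, c1]
      · by_cases h3 : PySem.Str.strip lines[k] = ""
        · -- blank line: skipped on both sides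
          rw [if_neg h1, if_neg h2, if_neg (by simp [h3])]
          have hb : (!(PySem.Str.strip lines[k] == "") && !(PySem.Str.startswith (PySem.Str.strip lines[k]) "#")) = false := by
            simp [h3]
          rw [hb]
          simp only [Bool.false_eq_true, if_false]
          rw [hcast, pvBcollect, hsplit]
          simp only [List.filterMap_append]
          rw [← pvBcollect, ih (by omega)]
          simp [pvBcollect, hget, c1]
        · -- code line: both stop, the block starts at k+1
          rw [if_neg h1, if_neg h2, if_pos h3]
          have hb : (!(PySem.Str.strip lines[k] == "") && !(PySem.Str.startswith (PySem.Str.strip lines[k]) "#")) = true := by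
            simp
            exact ⟨h3, by simpa using h2⟩
          rw [hb]
          simp only [if_true]
          rw [hcast]
          simp [pvBcollect, PySem.List.pyRange_one_eq_nil]

-- ===== VERDICT (by name: the statement is the Claim_ definition above) =====
theorem get_roxygen_docstring_py_spec : Claim_equal_get_roxygen_docstring_py := by
  intro lines func_line _ hpre
  unfold Spec_get_roxygen_docstring_py
  unfold get_roxygen_docstring_py get_roxygen_docstring_py_alt Pre_get_roxygen_docstring_py at *
  by_cases hpos : 0 ≤ func_line
  · have hn : ((func_line.toNat : Nat) : Int) = func_line := Int.toNat_of_nonneg hpos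
    have hle : func_line.toNat ≤ lines.length := by omega
    have := pv_main lines func_line.toNat hle
    rw [hn] at this
    simp only [this]
  · have hz : func_line.toNat = 0 := by omega
    rw [hz]
    simp [pvAloop, pvBstart, pvBcollect,
      PySem.List.pyRange_one_eq_nil (show func_line ≤ 0 by omega)]
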